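-- pv_equiv track=rewrite | github.com/wondongYang/TIL | algorithm/0829/jeong-gon's monotone increasing number.py | mono_incre
-- ===== SOURCE A (Python) =====
-- def mono_incre(num):
--     num_list = []
--     while num > 0:
--         num_list.append(num % 10)
--         num //= 10
--     for i in range(1, len(num_list)):
--         if num_list[i] <= num_list[i - 1]:
--             continue
--         else:
--             return 0
--     return 1
-- ===== SOURCE B (Python) =====
-- def mono_incre(num):
--     digits = []
--     n = num
--     while n > 0:
--         digits = [n % 10] + digits
--         n //= 10
--     return 1 if digits == sorted(digits) else 0
-- ===== Notes on version B (the rewrite author's own statement) =====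
-- stated objective: idiomatic
-- what changed: B builds the digit list MSB-first by prepending and replaces the index-based adjacent-pair scan with a single sort-and-compare (digits == sorted(digits)).
import Mathlib
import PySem

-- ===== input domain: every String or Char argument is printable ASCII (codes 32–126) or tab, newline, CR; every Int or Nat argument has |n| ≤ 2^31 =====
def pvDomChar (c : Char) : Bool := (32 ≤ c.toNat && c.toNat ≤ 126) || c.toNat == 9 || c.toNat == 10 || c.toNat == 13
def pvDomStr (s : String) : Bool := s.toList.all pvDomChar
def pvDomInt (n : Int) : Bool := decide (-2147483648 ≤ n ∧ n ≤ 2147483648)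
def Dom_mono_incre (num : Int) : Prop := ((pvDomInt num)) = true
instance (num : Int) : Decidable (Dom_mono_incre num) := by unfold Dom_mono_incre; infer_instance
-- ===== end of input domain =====

-- B replaces A's index-based adjacent-pair scan by building the digit list MSB-first and
-- comparing it with its sorted copy (idiomatic; no speed claim).

-- ===== PORT A =====
-- while num > 0: num_list.append(num % 10); num //= 10
def pvLoopA (num : Int) (acc : List Int) : List Int :=
  if h : num > 0 then
    pvLoopA (PySem.Int.floordiv num 10) (acc ++ [PySem.Int.mod num 10])
  else acc
termination_by num.toNat
decreasing_by
  rw [PySem.Int.floordiv_eq_ediv_of_pos (by norm_num : (0:Int) < 10)]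
  omega

-- for i in range(1, len(num_list)): if num_list[i] <= num_list[i-1] continue else return 0; return 1
def pvCheckA (l : List Int) (i : Nat) : Int :=
  if h : i < l.length then
    if (PySem.List.pyGet? l (i : Int)).getD 0 ≤ (PySem.List.pyGet? l ((i : Int) - 1)).getD 0 then
      pvCheckA l (i + 1)
    else 0
  else 1
termination_by l.length - i

def mono_incre (num : Int) : Int :=
  pvCheckA (pvLoopA num []) 1

-- ===== PORT B =====
-- while n > 0: digits = [n % 10] + digits; n //= 10
def pvLoopB (n : Int) (digits : List Int) : List Int :=
  if h : n > 0 then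
    pvLoopB (PySem.Int.floordiv n 10) ([PySem.Int.mod n 10] ++ digits)
  else digits
termination_by n.toNat
decreasing_by
  rw [PySem.Int.floordiv_eq_ediv_of_pos (by norm_num : (0:Int) < 10)]
  omega

-- return 1 if digits == sorted(digits) else 0
def mono_incre_alt (num : Int) : Int :=
  let digits := pvLoopB num []
  if digits = PySem.List.sorted digits (fun x => x) false then 1 else 0

-- ===== PRECONDITION & SPEC =====
def Spec_mono_incre (num : Int) (out : Int) : Prop := out = mono_incre_alt num
instance (num : Int) (out : Int) : Decidable (Spec_mono_incre num out) := by unfold Spec_mono_incre; infer_instance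

-- ===== CLAIM (what is proved, stated in full; the proofs are below) =====
def Claim_equal_mono_incre : Prop := ∀ (num : Int), Dom_mono_incre num → Spec_mono_incre num (mono_incre num)

-- ===== LEMMAS AND PROOFS =====

lemma pvLoopA_nonpos {n : Int} (h : ¬ n > 0) (acc : List Int) : pvLoopA n acc = acc := by
  rw [pvLoopA]; simp [h]

lemma pvLoopA_pos {n : Int} (h : n > 0) (acc : List Int) :
    pvLoopA n acc = pvLoopA (PySem.Int.floordiv n 10) (acc ++ [PySem.Int.mod n 10]) := by
  rw [pvLoopA]; simp [h]

lemma pvLoopB_nonpos {n : Int} (h : ¬ n > 0) (acc : List Int) : pvLoopB n acc = acc := by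
  rw [pvLoopB]; simp [h]

lemma pvLoopB_pos {n : Int} (h : n > 0) (acc : List Int) :
    pvLoopB n acc = pvLoopB (PySem.Int.floordiv n 10) ([PySem.Int.mod n 10] ++ acc) := by
  rw [pvLoopB]; simp [h]

lemma pvFloordiv_toNat_lt {n : Int} (h : n > 0) : (PySem.Int.floordiv n 10).toNat < n.toNat := by
  rw [PySem.Int.floordiv_eq_ediv_of_pos (by norm_num : (0:Int) < 10)]
  omega

-- A's loop with accumulator acc prepends acc to the digits list.
lemma pvLoopA_acc : ∀ (k : Nat) (n : Int), n.toNat ≤ k → ∀ acc, pvLoopA n acc = acc ++ pvLoopA n [] := by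
  intro k
  induction k with
  | zero =>
    intro n hn acc
    have h0 : ¬ n > 0 := by omega
    rw [pvLoopA_nonpos h0, pvLoopA_nonpos h0]
    simp
  | succ k ih =>
    intro n hn acc
    by_cases h0 : n > 0
    · have hlt : (PySem.Int.floordiv n 10).toNat ≤ k :=
        by have := pvFloordiv_toNat_lt h0; omega
      rw [pvLoopA_pos h0, pvLoopA_pos h0 []]
      rw [ih _ hlt (acc ++ [PySem.Int.mod n 10]), ih _ hlt ([] ++ [PySem.Int.mod n 10])]
      simp
    · rw [pvLoopA_nonpos h0, pvLoopA_nonpos h0]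
      simp

-- B's loop builds the reverse of A's digit list (prepend vs append).
lemma pvLoopB_eq_rev : ∀ (k : Nat) (n : Int), n.toNat ≤ k → ∀ acc, pvLoopB n acc = (pvLoopA n []).reverse ++ acc := by
  intro k
  induction k with
  | zero =>
    intro n hn acc
    have h0 : ¬ n > 0 := by omega
    rw [pvLoopB_nonpos h0, pvLoopA_nonpos h0]
    simp
  | succ k ih =>
    intro n hn acc
    by_cases h0 : n > 0
    · have hlt : (PySem.Int.floordiv n 10).toNat ≤ k :=
        by have := pvFloordiv_toNat_lt h0; omega
      rw [pvLoopB_pos h0, pvLoopA_pos h0 []]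
      rw [ih _ hlt, pvLoopA_acc k _ hlt ([] ++ [PySem.Int.mod n 10])]
      simp
    · rw [pvLoopB_nonpos h0, pvLoopA_nonpos h0]
      simp

lemma pvCheckA_ge {l : List Int} {i : Nat} (h : ¬ i < l.length) : pvCheckA l i = 1 := by
  rw [pvCheckA]; simp [h]

-- A's scan returns 1 iff every later digit is ≤ its predecessor, from position i on.
lemma pvCheckA_one_iff : ∀ (k : Nat) (l : List Int) (i : Nat), l.length - i ≤ k → 1 ≤ i →
    (pvCheckA l i = 1 ↔ ∀ j, i ≤ j → ∀ (hj : j < l.length), l[j] ≤ l[j-1]'(by omega)) := by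
  intro k
  induction k with
  | zero =>
    intro l i hk hi
    have h : ¬ i < l.length := by omega
    rw [pvCheckA_ge h]
    constructor
    · intro _ j hj hjl; omega
    · intro _; rfl
  | succ k ih =>
    intro l i hk hi
    by_cases h : i < l.length
    · rw [pvCheckA]
      simp only [h, dif_pos]
      have hi1 : ((i : Int) - 1) = ((i - 1 : Nat) : Int) := by omega
      rw [hi1, PySem.List.pyGet?_natCast, PySem.List.pyGet?_natCast]
      have h1 : i - 1 < l.length := by omega
      rw [List.getElem?_eq_getElem h, List.getElem?_eq_getElem h1]
      simp only [Option.getD_some]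
      by_cases hle : l[i] ≤ l[i-1]'h1
      · rw [if_pos hle, ih l (i+1) (by omega) (by omega)]
        constructor
        · intro hrest j hj hjl
          by_cases hji : j = i
          · subst hji; exact hle
          · exact hrest j (by omega) hjl
        · intro hall j hj hjl
          exact hall j (by omega) hjl
      · rw [if_neg hle]
        constructor
        · intro h01; exact absurd h01 (by norm_num)
        · intro hall; exact absurd (hall i (by omega) h) hle
    · rw [pvCheckA_ge h]
      constructor
      · intro _ j hj hjl; omega
      · intro _; rfl

-- A's scan only ever returns 0 or 1.
lemma pvCheckA_zero_or_one : ∀ (k : Nat) (l : List Int) (i : Nat), l.length - i ≤ k →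
    pvCheckA l i = 0 ∨ pvCheckA l i = 1 := by
  intro k
  induction k with
  | zero =>
    intro l i hk
    exact Or.inr (pvCheckA_ge (by omega))
  | succ k ih =>
    intro l i hk
    by_cases h : i < l.length
    · rw [pvCheckA]
      simp only [h, dif_pos]
      split_ifs
      · exact ih l (i+1) (by omega)
      · exact Or.inl rfl
    · exact Or.inr (pvCheckA_ge h)

lemma alt_zero_or_one (num : Int) : mono_incre_alt num = 0 ∨ mono_incre_alt num = 1 := by
  unfold mono_incre_alt
  dsimp only
  split_ifs <;> simp

-- B = 1 iff the MSB-first digit list is non-decreasing.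
lemma alt_one_iff (num : Int) :
    mono_incre_alt num = 1 ↔ ((pvLoopA num []).reverse).Pairwise (· ≤ ·) := by
  unfold mono_incre_alt
  rw [pvLoopB_eq_rev num.toNat num le_rfl []]
  simp only [List.append_nil]
  constructor
  · intro h1
    by_cases he : (pvLoopA num []).reverse = PySem.List.sorted ((pvLoopA num []).reverse) (fun x => x) false
    · have := PySem.List.sorted_pairwise (xs := (pvLoopA num []).reverse) (key := fun x => x)
      rw [← he] at this
      simpa using this
    · rw [if_neg he] at h1
      exact absurd h1 (by norm_num)
  · intro hp
    have := PySem.List.sorted_eq_self_of_pairwise (xs := (pvLoopA num []).reverse) (key := fun x => x) (by simpa using hp)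
    simp [this]

-- A = 1 iff the MSB-first digit list is non-decreasing.
lemma a_one_iff (num : Int) :
    mono_incre num = 1 ↔ ((pvLoopA num []).reverse).Pairwise (· ≤ ·) := by
  unfold mono_incre
  rw [pvCheckA_one_iff (pvLoopA num []).length (pvLoopA num []) 1 (by omega) le_rfl]
  rw [List.pairwise_reverse, List.pairwise_iff_getElem]
  constructor
  · intro h i j hi hj hij
    have step : ∀ j, ∀ (hj : j < (pvLoopA num []).length), ∀ i, ∀ (hij : i < j),
        (pvLoopA num [])[j] ≤ (pvLoopA num [])[i]'(by omega) := by
      intro j hj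
      induction j with
      | zero => intro i hi0; omega
      | succ m ihm =>
        intro i him
        have hm : m < (pvLoopA num []).length := by omega
        have hstep : (pvLoopA num [])[m+1]'hj ≤ (pvLoopA num [])[m]'hm := by
          have := h (m+1) (by omega) hj
          simpa using this
        by_cases him' : i = m
        · subst him'; exact hstep
        · exact le_trans hstep (ihm hm i (by omega))
    exact step j hj i hij
  · intro h j hj hjl
    exact h (j-1) j (by omega) hjl (by omega)

-- ===== VERDICT (by name: the statement is the Claim_ definition above) =====
theorem mono_incre_spec : Claim_equal_mono_incre := by
  intro num _
  unfold Spec_mono_incre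
  by_cases hp : ((pvLoopA num []).reverse).Pairwise (· ≤ ·)
  · rw [(a_one_iff num).2 hp, (alt_one_iff num).2 hp]
  · have hA : mono_incre num = 0 := by
      rcases pvCheckA_zero_or_one (pvLoopA num []).length (pvLoopA num []) 1 (by omega) with h0 | h1
      · exact h0
      · exact absurd ((a_one_iff num).1 h1) hp
    have hB : mono_incre_alt num = 0 := by
      rcases alt_zero_or_one num with h0 | h1
      · exact h0
      · exact absurd ((alt_one_iff num).1 h1) hp
    rw [hA, hB]
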